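-- pv_equiv track=rewrite | github.com/CeVauDe/advent-of-code-2025 | day3/day3.py | next_higher_digit_bank_still_long_enough
-- ===== SOURCE A (Python) =====
-- def next_higher_digit_bank_still_long_enough(
--     digit: int, bank: str, expected_remaining_length: int
-- ) -> bool:
--     for i, b in enumerate(bank):
--         if digit < int(b):
--             if len(bank) - i < expected_remaining_length:
--                 return False
--             else:
--                 return True
--     return False
-- ===== SOURCE B (Python) =====
-- def next_higher_digit_bank_still_long_enough(
--     digit: int, bank: str, expected_remaining_length: int
-- ) -> bool:
--     # Parse the whole bank once, then iterate over the ten digit VALUES instead of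
--     # over the string: for each digit d > digit take the position of its first
--     # occurrence (list.index) and keep the earliest; test the remaining length once.
--     values = [int(b) for b in bank]
--     hits = [values.index(d) for d in range(max(digit + 1, 0), 10) if d in values]
--     if not hits:
--         return False
--     return len(bank) - min(hits) >= expected_remaining_length
-- ===== Notes on version B (the rewrite author's own statement) =====
-- stated objective: alternative
-- what changed: B parses the bank into a list of digit values once and then iterates over the ten digit VALUES instead of over the string: for each digit d greater than `digit` it takes list.index's first-occurrence position of d and keeps the earliest, then tests the remaining length once.
-- outside the precondition, e.g. on next_higher_digit_bank_still_long_enough(3, 'x', 1): A raises ValueError, B raises ValueError; on next_higher_digit_bank_still_long_enough(3, '5x', 1): A returns True, B raises ValueError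
import Mathlib
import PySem

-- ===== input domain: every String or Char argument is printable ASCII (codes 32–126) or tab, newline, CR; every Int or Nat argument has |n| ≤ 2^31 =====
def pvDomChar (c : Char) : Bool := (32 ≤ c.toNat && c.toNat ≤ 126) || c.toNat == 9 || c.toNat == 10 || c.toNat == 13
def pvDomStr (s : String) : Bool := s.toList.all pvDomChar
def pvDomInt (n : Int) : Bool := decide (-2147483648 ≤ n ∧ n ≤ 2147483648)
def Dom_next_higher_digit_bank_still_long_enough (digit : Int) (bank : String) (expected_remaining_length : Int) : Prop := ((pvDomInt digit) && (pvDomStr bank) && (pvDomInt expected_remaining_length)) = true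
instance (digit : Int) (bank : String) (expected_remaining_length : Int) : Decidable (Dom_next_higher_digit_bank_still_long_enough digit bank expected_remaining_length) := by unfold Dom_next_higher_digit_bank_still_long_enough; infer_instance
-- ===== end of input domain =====

-- B parses the bank once, then iterates over the ten digit VALUES instead of over the string:
-- for each digit d > digit it takes the position of d's first occurrence and keeps the earliest
-- (objective: alternative decomposition); same return value on Pre_.

-- int(b) for one printable-ASCII char: succeeds exactly on '0'..'9' (exact on Dom; none = ValueError)
def pvInt1? (c : Char) : Option Int :=
  if c.isDigit then some ((c.toNat : Int) - 48) else none

-- ===== PORT A =====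
-- the for-loop over enumerate(bank): index i carried explicitly
def nhdGoA (digit len erl : Int) : List Char → Nat → Bool
  | [], _ => false
  | c :: cs, i =>
    match pvInt1? c with
    | none => false            -- Python raises ValueError here; excluded by Pre_
    | some v =>
      if digit < v then
        if len - (i : Int) < erl then false else true
      else nhdGoA digit len erl cs (i + 1)

def next_higher_digit_bank_still_long_enough (digit : Int) (bank : String) (expected_remaining_length : Int) : Bool :=
  nhdGoA digit (bank.toList.length : Int) expected_remaining_length bank.toList 0

-- ===== PORT B =====
def next_higher_digit_bank_still_long_enough_alt (digit : Int) (bank : String) (expected_remaining_length : Int) : Bool :=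
  -- values = [int(b) for b in bank]
  match bank.toList.mapM pvInt1? with
  | none => false                -- int(b) raises ValueError here; excluded by Pre_
  | some values =>
    -- hits = [values.index(d) for d in range(max(digit + 1, 0), 10) if d in values]
    -- (index? is none exactly when d not in values, so the guard and the index are one filterMap)
    -- if not hits: return False ; return len(bank) - min(hits) >= expected_remaining_length
    match PySem.List.min?
        ((PySem.List.pyRange (max (digit + 1) 0) 10 1).filterMap
          (fun d => (PySem.List.index? values d).map (fun i => (i : Int))))
        (fun h => h) with
    | none => false
    | some m => decide (expected_remaining_length ≤ (bank.toList.length : Int) - m)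

-- ===== PRECONDITION & SPEC =====
-- Pre_ excludes banks containing a non-digit character: A raises ValueError at the first one its
-- scan reaches (B, which parses the whole bank with int(), raises on any of them — also where a
-- higher digit precedes the junk and A still returns, e.g. (3, "5x", 1)).
def Pre_next_higher_digit_bank_still_long_enough (digit : Int) (bank : String) (expected_remaining_length : Int) : Prop :=
  bank.toList.all Char.isDigit = true

instance (digit : Int) (bank : String) (expected_remaining_length : Int) : Decidable (Pre_next_higher_digit_bank_still_long_enough digit bank expected_remaining_length) := by unfold Pre_next_higher_digit_bank_still_long_enough; infer_instance

def pvWitness_next_higher_digit_bank_still_long_enough : Int × String × Int := (3, "2571", 2)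

def Spec_next_higher_digit_bank_still_long_enough (digit : Int) (bank : String) (expected_remaining_length : Int) (out : Bool) : Prop := out = next_higher_digit_bank_still_long_enough_alt digit bank expected_remaining_length
instance (digit : Int) (bank : String) (expected_remaining_length : Int) (out : Bool) : Decidable (Spec_next_higher_digit_bank_still_long_enough digit bank expected_remaining_length out) := by unfold Spec_next_higher_digit_bank_still_long_enough; infer_instance

-- ===== CLAIM (what is proved, stated in full; the proofs are below) =====
def Claim_equal_next_higher_digit_bank_still_long_enough : Prop := ∀ (digit : Int) (bank : String) (expected_remaining_length : Int), Dom_next_higher_digit_bank_still_long_enough digit bank expected_remaining_length → Pre_next_higher_digit_bank_still_long_enough digit bank expected_remaining_length → Spec_next_higher_digit_bank_still_long_enough digit bank expected_remaining_length (next_higher_digit_bank_still_long_enough digit bank expected_remaining_length)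

-- ===== LEMMAS AND PROOFS =====

-- the digit value of a digit character, and A's trigger test on one character
def pvVal (c : Char) : Int := (c.toNat : Int) - 48
def pvHi (digit : Int) (c : Char) : Bool :=
  match pvInt1? c with
  | some v => decide (digit < v)
  | none => false

-- A's loop, on an all-digit bank, returns the length test at the FIRST index where pvHi holds
lemma nhdGoA_eq_findIdx? (digit len erl : Int) :
    ∀ (L : List Char) (i : Nat), (∀ c ∈ L, c.isDigit = true) →
      nhdGoA digit len erl L i =
        (match L.findIdx? (pvHi digit) with
         | some j => decide (¬ (len - ((i + j : Nat) : Int) < erl))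
         | none => false) := by
  intro L
  induction L with
  | nil => intro i _; simp [nhdGoA]
  | cons c cs ih =>
    intro i hdg
    have hc : pvInt1? c = some (pvVal c) := by
      simp [pvInt1?, pvVal, hdg c List.mem_cons_self]
    by_cases hv : digit < pvVal c
    · have hp : pvHi digit c = true := by simp [pvHi, hc, hv]
      simp only [nhdGoA, hc, hv, if_true, List.findIdx?_cons, hp]
      by_cases h : len - (i : Int) < erl <;> simp [h]
    · have hp : pvHi digit c = false := by simp [pvHi, hc, hv]
      have := ih (i + 1) (fun x hx => hdg x (List.mem_cons_of_mem c hx))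
      rw [nhdGoA, hc]
      simp only [hv, if_false, this, List.findIdx?_cons, hp, Bool.false_eq_true, if_false]
      cases h : cs.findIdx? (pvHi digit) with
      | none => simp
      | some j =>
        simp only [Option.map_some]
        have e : i + 1 + j = i + (j + 1) := by omega
        rw [e]

lemma nhdGoA_eq (digit len erl : Int) (L : List Char) (hdg : ∀ c ∈ L, c.isDigit = true) :
    nhdGoA digit len erl L 0 =
      (match L.findIdx? (pvHi digit) with
       | some j => decide (erl ≤ len - (j : Int))
       | none => false) := by
  rw [nhdGoA_eq_findIdx? digit len erl L 0 hdg]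
  cases h : L.findIdx? (pvHi digit) with
  | none => rfl
  | some j => simp [not_lt]

-- int() over a fully-digit string succeeds character by character
lemma pvMapM (L : List Char) (h : ∀ c ∈ L, c.isDigit) :
    L.mapM pvInt1? = some (L.map pvVal) := by
  induction L with
  | nil => rfl
  | cons c cs ih =>
    have hc : pvInt1? c = some (pvVal c) := by
      simp [pvInt1?, pvVal, h c (List.mem_cons_self)]
    simp [List.mapM_cons, hc, ih (fun x hx => h x (List.mem_cons_of_mem c hx))]

lemma pvFindIdxMap (digit : Int) (L : List Char) (h : ∀ c ∈ L, c.isDigit) :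
    (L.map pvVal).findIdx? (fun v => decide (digit < v)) = L.findIdx? (pvHi digit) := by
  induction L with
  | nil => rfl
  | cons c cs ih =>
    have hc : pvHi digit c = decide (digit < pvVal c) := by
      simp [pvHi, pvInt1?, pvVal, h c (List.mem_cons_self)]
    simp only [List.map_cons, List.findIdx?_cons, hc,
      ih (fun x hx => h x (List.mem_cons_of_mem c hx))]

lemma pvDigitBound (L : List Char) (h : ∀ c ∈ L, c.isDigit) :
    ∀ v ∈ L.map pvVal, 0 ≤ v ∧ v < 10 := by
  intro v hv
  obtain ⟨c, hc, rfl⟩ := List.mem_map.mp hv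
  have hd := h c hc
  simp only [Char.isDigit, ge_iff_le, Bool.and_eq_true, decide_eq_true_eq,
    UInt32.le_iff_toNat_le, Char.toNat_val] at hd
  have h48 : ('0' : Char).toNat = 48 := rfl
  have h57 : ('9' : Char).toNat = 57 := rfl
  rw [h48, h57] at hd
  unfold pvVal
  omega

-- min over the first-occurrence indices of the digits above `digit`
-- equals the first index holding a digit above `digit`
lemma pvHitsMin (digit : Int) (values : List Int)
    (hb : ∀ v ∈ values, 0 ≤ v ∧ v < 10) :
    PySem.List.min?
        ((PySem.List.pyRange (max (digit + 1) 0) 10 1).filterMap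
          (fun d => (PySem.List.index? values d).map (fun i => (i : Int))))
        (fun h => h) =
      (values.findIdx? (fun v => decide (digit < v))).map (fun t => (t : Int)) := by
  set R := PySem.List.pyRange (max (digit + 1) 0) 10 1 with hRdef
  set hits := R.filterMap (fun d => (PySem.List.index? values d).map (fun i => (i : Int))) with hHits
  cases hn : values.findIdx? (fun v => decide (digit < v)) with
  | none =>
    have hall := List.findIdx?_eq_none_iff.mp hn
    have hnil : hits = [] := by
      rw [hHits, List.filterMap_eq_nil_iff]
      intro d hdR
      obtain ⟨h1, h2⟩ := PySem.List.mem_pyRange_one.mp hdR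
      have hnone : PySem.List.index? values d = none := by
        rw [PySem.List.index?_eq_none_iff]
        intro hmem
        have := hall d hmem
        simp at this
        omega
      rw [hnone]
      rfl
    rw [hnil]
    rfl
  | some t =>
    obtain ⟨ht, hpt, hmin⟩ := List.findIdx?_eq_some_iff_getElem.mp hn
    have hptv : digit < values[t] := by simpa using hpt
    obtain ⟨hv0, hv1⟩ := hb values[t] (values.getElem_mem ht)
    have hv0R : values[t] ∈ R := by
      rw [hRdef]
      exact PySem.List.mem_pyRange_one.mpr ⟨max_le (by omega) hv0, hv1⟩
    -- index? of values[t] is t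
    have hidx : PySem.List.index? values values[t] = some t := by
      cases hio : PySem.List.index? values values[t] with
      | none =>
        rw [PySem.List.index?_eq_none_iff] at hio
        exact absurd (values.getElem_mem ht) hio
      | some k =>
        obtain ⟨hk, hvk, hkmin⟩ := PySem.List.getElem_of_index?_eq_some hio
        have h1 : ¬ k < t := fun hlt => hmin k hlt (by simp only [hvk, decide_eq_true_eq]; omega)
        have h2 : ¬ t < k := fun hlt => hkmin t hlt rfl
        have hkt : k = t := by omega
        rw [hkt]
    have htmem : (t : Int) ∈ hits := by
      rw [hHits, List.mem_filterMap]
      exact ⟨values[t], hv0R, by rw [hidx]; rfl⟩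
    have hlb : ∀ y ∈ hits, (t : Int) ≤ y := by
      intro y hy
      rw [hHits, List.mem_filterMap] at hy
      obtain ⟨d, hdR, hdy⟩ := hy
      obtain ⟨h1, h2⟩ := PySem.List.mem_pyRange_one.mp hdR
      cases hio : PySem.List.index? values d with
      | none => rw [hio] at hdy; simp at hdy
      | some k =>
        rw [hio] at hdy
        simp at hdy
        obtain ⟨hk, hvk, _⟩ := PySem.List.getElem_of_index?_eq_some hio
        have : ¬ k < t := fun hlt => hmin k hlt (by simp only [hvk, decide_eq_true_eq]; omega)
        omega
    cases hm : PySem.List.min? hits (fun h => h) with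
    | none =>
      rw [PySem.List.min?_eq_none_iff] at hm
      rw [hm] at htmem
      simp at htmem
    | some m =>
      have h1 : (t : Int) ≤ m := hlb m (PySem.List.min?_mem hm)
      have h2 : m ≤ (t : Int) := PySem.List.min?_isMin hm _ htmem
      simp [le_antisymm h2 h1]


-- ===== VERDICT (by name: the statement is the Claim_ definition above) =====
theorem next_higher_digit_bank_still_long_enough_spec : Claim_equal_next_higher_digit_bank_still_long_enough := by
  intro digit bank erl _ hpre
  unfold Spec_next_higher_digit_bank_still_long_enough
  unfold next_higher_digit_bank_still_long_enough next_higher_digit_bank_still_long_enough_alt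
  have hdg : ∀ c ∈ bank.toList, c.isDigit = true := by
    have h := hpre
    unfold Pre_next_higher_digit_bank_still_long_enough at h
    simpa [List.all_eq_true] using h
  rw [nhdGoA_eq digit (bank.toList.length : Int) erl bank.toList hdg]
  simp only [pvMapM bank.toList hdg]
  rw [pvHitsMin digit (bank.toList.map pvVal) (pvDigitBound bank.toList hdg),
    pvFindIdxMap digit bank.toList hdg]
  cases h : bank.toList.findIdx? (pvHi digit) <;> rfl
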